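-- pv_equiv track=rewrite | github.com/lakminagamage/aces-coders-2024-hypercubeX | burning-trees.py | min_minutes_to_burn_forest
-- ===== SOURCE A (Python) =====
-- from collections import deque
--
-- def min_minutes_to_burn_forest(m, n, grid):
--     queue = deque()
--     total_trees = 0
--
--     for i in range(m):
--         for j in range(n):
--             if grid[i][j] == 2:
--                 queue.append((i, j, 0))
--             if grid[i][j] == 1:
--                 total_trees += 1
--
--     directions = [(-1, 0), (1, 0), (0, -1), (0, 1)]
--     minutes = 0
--     burned_trees = 0
--
--     while queue:
--         x, y, minute = queue.popleft()
--         minutes = max(minutes, minute)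
--
--         for dx, dy in directions:
--             nx, ny = x + dx, y + dy
--             if 0 <= nx < m and 0 <= ny < n and grid[nx][ny] == 1:
--                 grid[nx][ny] = 2
--                 queue.append((nx, ny, minute + 1))
--                 burned_trees += 1
--
--     if burned_trees == total_trees:
--         return minutes
--     else:
--         return -1
-- ===== SOURCE B (Python) =====
-- def min_minutes_to_burn_forest(m, n, grid):
--     # Queueless fixed-point simulation: each minute, scan the whole grid (as a
--     # snapshot), collect every tree adjacent to a burning cell, ignite them all
--     # at once; repeat until nothing changes, then rescan for unburned trees.
--     # Mutates grid in place exactly like the original.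
--     minutes = 0
--     while True:
--         ignited = [(i, j) for i in range(m) for j in range(n)
--                    if grid[i][j] == 1 and any(
--                        grid[x][y] == 2
--                        for x, y in ((i - 1, j), (i + 1, j), (i, j - 1), (i, j + 1))
--                        if 0 <= x < m and 0 <= y < n)]
--         if not ignited:
--             break
--         for i, j in ignited:
--             grid[i][j] = 2
--         minutes += 1
--     if any(grid[i][j] == 1 for i in range(m) for j in range(n)):
--         return -1
--     return minutes
-- ===== Notes on version B (the rewrite author's own statement) =====
-- stated objective: alternative
-- what changed: Replaces the deque-based BFS (minute stamps, burned/total counters) by a queueless fixed-point simulation: each minute a full-grid snapshot scan collects every tree adjacent to a burning cell, ignites them all at once, and repeats until no change, ending with a rescan for unburned trees.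
import Mathlib
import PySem

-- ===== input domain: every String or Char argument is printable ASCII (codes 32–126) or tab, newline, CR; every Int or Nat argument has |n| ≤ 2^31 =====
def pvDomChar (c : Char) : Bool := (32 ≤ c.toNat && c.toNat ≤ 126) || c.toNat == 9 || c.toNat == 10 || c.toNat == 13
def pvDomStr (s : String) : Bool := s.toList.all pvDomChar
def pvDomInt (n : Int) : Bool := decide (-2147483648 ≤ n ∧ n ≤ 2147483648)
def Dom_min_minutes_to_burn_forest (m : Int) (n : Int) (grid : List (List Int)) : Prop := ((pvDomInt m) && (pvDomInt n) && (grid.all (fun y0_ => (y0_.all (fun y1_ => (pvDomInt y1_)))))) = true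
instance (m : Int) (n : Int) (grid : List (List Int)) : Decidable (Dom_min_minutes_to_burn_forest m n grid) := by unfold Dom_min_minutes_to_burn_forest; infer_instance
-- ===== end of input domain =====

-- B replaces A's deque BFS (minute stamps, burned/total counters) by a queueless
-- fixed-point simulation: each minute a full-grid snapshot scan ignites every tree
-- adjacent to fire, until nothing changes. Both Pythons mutate `grid` identically;
-- the equivalence proved here is about the return value (the ports are pure).

-- ===== PORT A =====
-- grid[x][y]: indices are nonnegative and in range whenever the ports read a non-default
-- value (out-of-range reads yield 0/[], which both guards reject), exact under Pre_.
def pvCell (g : List (List Int)) (x y : Int) : Int := (g.getD x.toNat []).getD y.toNat 0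

-- grid[x][y] = 2 (in-place assignment, modelled functionally)
def pvSet (g : List (List Int)) (x y : Int) : List (List Int) :=
  g.set x.toNat ((g.getD x.toNat []).set y.toNat 2)

-- number of 1-cells in the scanned region: the termination measure of both loops
def pvOnes (m n : Int) (g : List (List Int)) : Nat :=
  ((PySem.List.pyRange 0 m 1).map (fun i =>
    ((PySem.List.pyRange 0 n 1).filter (fun j => pvCell g i j == 1)).length)).sum

-- termination lemmas (cited by the ports' decreasing_by) --------------------------------

theorem pv_filter_pt (l : List Int) (p p' : Int → Bool) (y : Int)
    (hnd : l.Nodup) (hy : y ∈ l) (hp : p y = true) (hp' : p' y = false)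
    (hagree : ∀ j ∈ l, j ≠ y → p' j = p j) :
    (l.filter p).length = (l.filter p').length + 1 := by
  induction l with
  | nil => cases hy
  | cons a t ih =>
    rcases List.nodup_cons.mp hnd with ⟨ha, hndt⟩
    rcases List.mem_cons.mp hy with rfl | hyt
    · have : ∀ j ∈ t, p' j = p j := fun j hj => hagree j (List.mem_cons_of_mem _ hj) (fun h => ha (h ▸ hj))
      have : t.filter p' = t.filter p := List.filter_congr this
      simp [List.filter, hp, hp', this]
    · have hay : a ≠ y := fun h => ha (h ▸ hyt)
      have hpa : p' a = p a := hagree a List.mem_cons_self hay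
      have := ih hndt hyt (fun j hj hne => hagree j (List.mem_cons_of_mem _ hj) hne)
      cases hpa' : p a <;> simp [List.filter, hpa', hpa ▸ hpa', this]

theorem pv_sum_pt (l : List Int) (f f' : Int → Nat) (x : Int)
    (hnd : l.Nodup) (hx : x ∈ l) (hfx : f x = f' x + 1)
    (hagree : ∀ i ∈ l, i ≠ x → f' i = f i) :
    (l.map f).sum = (l.map f').sum + 1 := by
  induction l with
  | nil => cases hx
  | cons a t ih =>
    rcases List.nodup_cons.mp hnd with ⟨ha, hndt⟩
    rcases List.mem_cons.mp hx with rfl | hxt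
    · have : ∀ i ∈ t, f' i = f i := fun i hi => hagree i (List.mem_cons_of_mem _ hi) (fun h => ha (h ▸ hi))
      have : t.map f' = t.map f := List.map_congr_left this
      simp [hfx, this]; omega
    · have hax : a ≠ x := fun h => ha (h ▸ hxt)
      have hfa : f' a = f a := hagree a List.mem_cons_self hax
      have := ih hndt hxt (fun i hi hne => hagree i (List.mem_cons_of_mem _ hi) hne)
      simp [hfa, this]; omega

theorem pv_getD_set_self {α : Type} (l : List α) (i : Nat) (a d : α) (h : i < l.length) :
    (l.set i a).getD i d = a := by
  rw [List.getD_eq_getElem?_getD, List.getElem?_set_self h]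
  rfl

theorem pv_getD_set_ne {α : Type} (l : List α) {i j : Nat} (a : α) (d : α) (h : i ≠ j) :
    (l.set i a).getD j d = l.getD j d := by
  rw [List.getD_eq_getElem?_getD, List.getElem?_set_ne h, ← List.getD_eq_getElem?_getD]

theorem pvCell_row_lt {g : List (List Int)} {x y : Int} (h : pvCell g x y = 1) :
    x.toNat < g.length := by
  by_contra hx
  unfold pvCell at h
  rw [List.getD_eq_default g [] (by omega)] at h
  rw [List.getD_nil] at h
  exact absurd h (by norm_num)

theorem pvCell_col_lt {g : List (List Int)} {x y : Int} (h : pvCell g x y = 1) :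
    y.toNat < (g.getD x.toNat []).length := by
  by_contra hy
  unfold pvCell at h
  rw [List.getD_eq_default (g.getD x.toNat []) 0 (by omega)] at h
  exact absurd h (by norm_num)

theorem pvCell_set_self {g : List (List Int)} {x y : Int} (h : pvCell g x y = 1) :
    pvCell (pvSet g x y) x y = 2 := by
  have hx := pvCell_row_lt h
  have hy := pvCell_col_lt h
  unfold pvCell pvSet
  rw [pv_getD_set_self g x.toNat _ [] hx, pv_getD_set_self _ y.toNat _ 0 hy]

theorem pvCell_set_ne {g : List (List Int)} {x y i j : Int} (h : pvCell g x y = 1)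
    (hne : i.toNat ≠ x.toNat ∨ j.toNat ≠ y.toNat) :
    pvCell (pvSet g x y) i j = pvCell g i j := by
  rcases hne with hne | hne
  · unfold pvCell pvSet
    rw [pv_getD_set_ne g _ [] (Ne.symm hne)]
  · unfold pvCell pvSet
    by_cases hi : i.toNat = x.toNat
    · have hx := pvCell_row_lt h
      rw [hi, pv_getD_set_self g x.toNat _ [] hx, pv_getD_set_ne _ _ 0 (Ne.symm hne)]
    · rw [pv_getD_set_ne g _ [] (Ne.symm hi)]

theorem pv_ones_set (m n : Int) {g : List (List Int)} {x y : Int}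
    (hx0 : 0 ≤ x) (hxm : x < m) (hy0 : 0 ≤ y) (hyn : y < n) (h : pvCell g x y = 1) :
    pvOnes m n g = pvOnes m n (pvSet g x y) + 1 := by
  unfold pvOnes
  apply pv_sum_pt _ _ _ x (PySem.List.nodup_pyRange_one _ _)
    (PySem.List.mem_pyRange_one.mpr ⟨hx0, hxm⟩)
  · apply pv_filter_pt _ _ _ y (PySem.List.nodup_pyRange_one _ _)
      (PySem.List.mem_pyRange_one.mpr ⟨hy0, hyn⟩)
    · simp [h]
    · simp [pvCell_set_self h]
    · intro j hj hne
      have hj0 : 0 ≤ j := (PySem.List.mem_pyRange_one.mp hj).1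
      have : j.toNat ≠ y.toNat := by omega
      simp [pvCell_set_ne h (Or.inr this)]
  · intro i hi hne
    have hi0 : 0 ≤ i := (PySem.List.mem_pyRange_one.mp hi).1
    have : i.toNat ≠ x.toNat := by omega
    apply congrArg
    apply List.filter_congr
    intro j hj
    simp [pvCell_set_ne h (Or.inl this)]

-- one direction step of A's inner `for dx, dy in directions` loop
def aBurn (m n x y minute : Int)
    (st : List (List Int) × List (Int × Int × Int) × Int) (d : Int × Int) :
    List (List Int) × List (Int × Int × Int) × Int :=
  if 0 ≤ x + d.1 ∧ x + d.1 < m ∧ 0 ≤ y + d.2 ∧ y + d.2 < n ∧ pvCell st.1 (x + d.1) (y + d.2) = 1 then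
    (pvSet st.1 (x + d.1) (y + d.2), st.2.1 ++ [(x + d.1, y + d.2, minute + 1)], st.2.2 + 1)
  else st

def aDirs : List (Int × Int) := [(-1, 0), (1, 0), (0, -1), (0, 1)]

theorem aBurn_ones (m n x y minute : Int) (ds : List (Int × Int))
    (st : List (List Int) × List (Int × Int × Int) × Int) :
    pvOnes m n (ds.foldl (aBurn m n x y minute) st).1 +
      ((ds.foldl (aBurn m n x y minute) st).2.1).length =
    pvOnes m n st.1 + st.2.1.length := by
  induction ds generalizing st with
  | nil => rfl
  | cons d t ih =>
    rw [List.foldl_cons, ih]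
    unfold aBurn
    split_ifs with h
    · obtain ⟨h1, h2, h3, h4, h5⟩ := h
      have := pv_ones_set m n h1 h2 h3 h4 h5
      simp; omega
    · rfl

-- A's while loop over the stamped queue; state (grid, queue, minutes, burned)
def aLoop (m n : Int) (g : List (List Int)) (q : List (Int × Int × Int))
    (minutes burned : Int) : Int × Int :=
  match q with
  | [] => (minutes, burned)
  | (x, y, minute) :: rest =>
    aLoop m n (aDirs.foldl (aBurn m n x y minute) (g, [], burned)).1
      (rest ++ (aDirs.foldl (aBurn m n x y minute) (g, [], burned)).2.1)
      (max minutes minute)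
      (aDirs.foldl (aBurn m n x y minute) (g, [], burned)).2.2
termination_by pvOnes m n g + q.length
decreasing_by
  have h := aBurn_ones m n x y minute aDirs (g, [], burned)
  simp only [List.length_nil] at h
  simp only [List.length_append, List.length_cons]
  omega

-- A's initial scan: (queue of sources stamped 0, total_trees)
def aScan (m n : Int) (g : List (List Int)) : List (Int × Int × Int) × Int :=
  (PySem.List.pyRange 0 m 1).foldl (fun st i =>
    (PySem.List.pyRange 0 n 1).foldl (fun st j =>
      let st := if pvCell g i j = 2 then (st.1 ++ [(i, j, (0 : Int))], st.2) else st
      if pvCell g i j = 1 then (st.1, st.2 + 1) else st) st) ([], 0)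

def min_minutes_to_burn_forest (m : Int) (n : Int) (grid : List (List Int)) : Int :=
  if (aLoop m n grid (aScan m n grid).1 0 0).2 = (aScan m n grid).2 then
    (aLoop m n grid (aScan m n grid).1 0 0).1
  else -1

-- ===== PORT B =====
-- the `ignited` comprehension: a full scan of the m×n region over the grid snapshot
def sIgnited (m n : Int) (g : List (List Int)) : List (Int × Int) :=
  (PySem.List.pyRange 0 m 1).flatMap (fun i =>
    ((PySem.List.pyRange 0 n 1).filter (fun j =>
      (pvCell g i j == 1) &&
      (([(i - 1, j), (i + 1, j), (i, j - 1), (i, j + 1)] : List (Int × Int)).any (fun q =>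
        decide (0 ≤ q.1 ∧ q.1 < m ∧ 0 ≤ q.2 ∧ q.2 < n) && (pvCell g q.1 q.2 == 2))))).map
      (fun j => (i, j)))

-- `for i, j in ignited: grid[i][j] = 2`
def sApply (g : List (List Int)) (L : List (Int × Int)) : List (List Int) :=
  L.foldl (fun g p => pvSet g p.1 p.2) g

-- termination lemmas for B's while loop --------------------------------

theorem pvCell_set_one {g : List (List Int)} {x y i j : Int}
    (h : pvCell (pvSet g x y) i j = 1) : pvCell g i j = 1 := by
  by_cases hi : i.toNat = x.toNat
  · by_cases hj : j.toNat = y.toNat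
    · unfold pvCell pvSet at *
      by_cases hx : x.toNat < g.length
      · rw [hi, pv_getD_set_self g x.toNat _ [] hx] at h
        by_cases hy : y.toNat < (g.getD x.toNat []).length
        · rw [hj, pv_getD_set_self _ y.toNat _ 0 hy] at h
          exact absurd h (by norm_num)
        · rw [List.set_eq_of_length_le (by omega)] at h
          rw [hi]; exact h
      · rw [List.set_eq_of_length_le (by omega)] at h
        exact h
    · unfold pvCell pvSet at *
      by_cases hx : x.toNat < g.length
      · rw [hi, pv_getD_set_self g x.toNat _ [] hx, pv_getD_set_ne _ _ 0 (Ne.symm hj)] at h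
        rw [hi]; exact h
      · rw [List.set_eq_of_length_le (by omega)] at h; exact h
  · unfold pvCell pvSet at *
    rw [pv_getD_set_ne g _ [] (Ne.symm hi)] at h
    exact h

theorem pv_ones_set_le (m n : Int) (g : List (List Int)) (x y : Int) :
    pvOnes m n (pvSet g x y) ≤ pvOnes m n g := by
  unfold pvOnes
  apply List.sum_le_sum
  intro i _
  rw [← List.countP_eq_length_filter, ← List.countP_eq_length_filter]
  apply List.countP_mono_left
  intro j _ hj
  simp only [beq_iff_eq] at *
  exact pvCell_set_one hj

theorem pv_ones_apply_le (m n : Int) (L : List (Int × Int)) :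
    ∀ g, pvOnes m n (sApply g L) ≤ pvOnes m n g := by
  induction L with
  | nil => intro g; exact le_rfl
  | cons p t ih =>
    intro g
    exact le_trans (ih (pvSet g p.1 p.2)) (pv_ones_set_le m n g p.1 p.2)

theorem mem_sIgnited_guard {m n : Int} {g : List (List Int)} {q : Int × Int}
    (h : q ∈ sIgnited m n g) :
    0 ≤ q.1 ∧ q.1 < m ∧ 0 ≤ q.2 ∧ q.2 < n ∧ pvCell g q.1 q.2 = 1 := by
  unfold sIgnited at h
  simp only [List.mem_flatMap, List.mem_map, List.mem_filter] at h
  rcases h with ⟨i, hi, j, ⟨hj, hcond⟩, rfl⟩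
  rcases PySem.List.mem_pyRange_one.mp hi with ⟨hi0, him⟩
  rcases PySem.List.mem_pyRange_one.mp hj with ⟨hj0, hjn⟩
  simp only [Bool.and_eq_true, beq_iff_eq] at hcond
  exact ⟨hi0, him, hj0, hjn, hcond.1⟩

theorem s_dec (m n : Int) (g : List (List Int)) (h : sIgnited m n g ≠ []) :
    pvOnes m n (sApply g (sIgnited m n g)) < pvOnes m n g := by
  rcases hL : sIgnited m n g with _ | ⟨q, t⟩
  · exact absurd hL h
  · have hq : q ∈ sIgnited m n g := hL ▸ List.mem_cons_self
    obtain ⟨h1, h2, h3, h4, h5⟩ := mem_sIgnited_guard hq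
    have hone := pv_ones_set m n h1 h2 h3 h4 h5
    have := pv_ones_apply_le m n t (pvSet g q.1 q.2)
    show pvOnes m n (sApply (pvSet g q.1 q.2) t) < pvOnes m n g
    omega

-- B's `while True` loop: sweep, ignite all, count the round; stop at a fixed point
def sLoop (m n : Int) (g : List (List Int)) (minutes : Int) : Int × List (List Int) :=
  if h : sIgnited m n g = [] then (minutes, g)
  else sLoop m n (sApply g (sIgnited m n g)) (minutes + 1)
termination_by pvOnes m n g
decreasing_by exact s_dec m n g h

def min_minutes_to_burn_forest_alt (m : Int) (n : Int) (grid : List (List Int)) : Int :=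
  if (PySem.List.pyRange 0 m 1).any (fun i =>
      (PySem.List.pyRange 0 n 1).any (fun j =>
        pvCell (sLoop m n grid 0).2 i j == 1)) then -1
  else (sLoop m n grid 0).1

-- ===== PRECONDITION & SPEC =====
-- Pre_ excludes exactly the inputs where Python A raises IndexError: when n > 0 the
-- scan reads grid[i][j] for all 0 ≤ i < m, 0 ≤ j < n, so m rows and n columns must
-- exist (when n ≤ 0 the inner loop body never runs and nothing is indexed).
def Pre_min_minutes_to_burn_forest (m : Int) (n : Int) (grid : List (List Int)) : Prop :=
  n ≤ 0 ∨ (m.toNat ≤ grid.length ∧ ∀ row ∈ grid.take m.toNat, n.toNat ≤ row.length)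
instance (m : Int) (n : Int) (grid : List (List Int)) : Decidable (Pre_min_minutes_to_burn_forest m n grid) := by unfold Pre_min_minutes_to_burn_forest; infer_instance

def pvWitness_min_minutes_to_burn_forest : Int × Int × List (List Int) := (2, 2, [[2, 1], [0, 1]])

def Spec_min_minutes_to_burn_forest (m : Int) (n : Int) (grid : List (List Int)) (out : Int) : Prop := out = min_minutes_to_burn_forest_alt m n grid
instance (m : Int) (n : Int) (grid : List (List Int)) (out : Int) : Decidable (Spec_min_minutes_to_burn_forest m n grid out) := by unfold Spec_min_minutes_to_burn_forest; infer_instance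

-- ===== CLAIM (what is proved, stated in full; the proofs are below) =====
def Claim_equal_min_minutes_to_burn_forest : Prop := ∀ (m : Int) (n : Int) (grid : List (List Int)), Dom_min_minutes_to_burn_forest m n grid → Pre_min_minutes_to_burn_forest m n grid → Spec_min_minutes_to_burn_forest m n grid (min_minutes_to_burn_forest m n grid)

-- ===== LEMMAS AND PROOFS =====

-- Proof device: the level-by-level frontier BFS, a halfway house between A's stamped
-- queue and B's full-grid sweeps.
def bNbrs (x y : Int) : List (Int × Int) := [(x - 1, y), (x + 1, y), (x, y - 1), (x, y + 1)]

def bBurn (m n : Int) (st : List (List Int) × List (Int × Int)) (p : Int × Int) :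
    List (List Int) × List (Int × Int) :=
  if 0 ≤ p.1 ∧ p.1 < m ∧ 0 ≤ p.2 ∧ p.2 < n ∧ pvCell st.1 p.1 p.2 = 1 then
    (pvSet st.1 p.1 p.2, st.2 ++ [p])
  else st

def bRound (m n : Int) (g : List (List Int)) (frontier : List (Int × Int)) :
    List (List Int) × List (Int × Int) :=
  frontier.foldl (fun st p => (bNbrs p.1 p.2).foldl (bBurn m n) st) (g, [])

theorem bBurn_ones (m n : Int) (ps : List (Int × Int))
    (st : List (List Int) × List (Int × Int)) :
    pvOnes m n (ps.foldl (bBurn m n) st).1 + ((ps.foldl (bBurn m n) st).2).length =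
    pvOnes m n st.1 + st.2.length := by
  induction ps generalizing st with
  | nil => rfl
  | cons p t ih =>
    rw [List.foldl_cons, ih]
    unfold bBurn
    split_ifs with h
    · obtain ⟨h1, h2, h3, h4, h5⟩ := h
      have := pv_ones_set m n h1 h2 h3 h4 h5
      simp; omega
    · rfl

theorem bRound_ones (m n : Int) (F : List (Int × Int)) (g : List (List Int))
    (acc : List (Int × Int)) :
    pvOnes m n (F.foldl (fun st p => (bNbrs p.1 p.2).foldl (bBurn m n) st) (g, acc)).1 +
      ((F.foldl (fun st p => (bNbrs p.1 p.2).foldl (bBurn m n) st) (g, acc)).2).length =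
    pvOnes m n g + acc.length := by
  induction F generalizing g acc with
  | nil => rfl
  | cons p t ih =>
    rw [List.foldl_cons]
    have h := bBurn_ones m n (bNbrs p.1 p.2) (g, acc)
    rcases hr : (bNbrs p.1 p.2).foldl (bBurn m n) (g, acc) with ⟨g', acc'⟩
    rw [hr] at h
    rw [ih g' acc', h]

def bLoop (m n : Int) (g : List (List Int)) (frontier : List (Int × Int)) (minutes : Int) :
    Int × List (List Int) :=
  if frontier = [] then (minutes, g)
  else if (bRound m n g frontier).2 = [] then (minutes, (bRound m n g frontier).1)
  else bLoop m n (bRound m n g frontier).1 (bRound m n g frontier).2 (minutes + 1)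
termination_by pvOnes m n g
decreasing_by
  rename_i _h1 h2
  have h := bRound_ones m n frontier g []
  unfold bRound at *
  have : (frontier.foldl (fun st p => (bNbrs p.1 p.2).foldl (bBurn m n) st) (g, [])).2.length ≠ 0 := by
    simpa [List.length_eq_zero_iff] using h2
  simp only [List.length_nil] at h
  omega

def bFrontier (m n : Int) (g : List (List Int)) : List (Int × Int) :=
  (PySem.List.pyRange 0 m 1).flatMap (fun i =>
    ((PySem.List.pyRange 0 n 1).filter (fun j => pvCell g i j == 2)).map (fun j => (i, j)))

-- ---- bridge A ↔ level BFS (aLoop ↔ bLoop) ----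

def pvStamp (d : Int) (F : List (Int × Int)) : List (Int × Int × Int) :=
  F.map (fun p => (p.1, p.2, d))

theorem aBurn_shift (m n x y minute : Int) (st : List (List Int) × List (Int × Int × Int) × Int)
    (d : Int × Int) :
    aBurn m n x y minute st d =
      ((aBurn m n x y minute (st.1, [], 0) d).1,
       st.2.1 ++ (aBurn m n x y minute (st.1, [], 0) d).2.1,
       st.2.2 + ((aBurn m n x y minute (st.1, [], 0) d).2.1.length : Int)) := by
  unfold aBurn
  split_ifs <;> simp

theorem aBurn_acc (m n x y minute : Int) (ds : List (Int × Int)) :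
    ∀ (st : List (List Int) × List (Int × Int × Int) × Int),
    ds.foldl (aBurn m n x y minute) st =
      ((ds.foldl (aBurn m n x y minute) (st.1, [], 0)).1,
       st.2.1 ++ (ds.foldl (aBurn m n x y minute) (st.1, [], 0)).2.1,
       st.2.2 + ((ds.foldl (aBurn m n x y minute) (st.1, [], 0)).2.1.length : Int)) := by
  induction ds with
  | nil => intro st; simp
  | cons d t ih =>
    intro st
    rw [List.foldl_cons, List.foldl_cons, ih (aBurn m n x y minute st d),
      ih (aBurn m n x y minute (st.1, [], 0) d), aBurn_shift m n x y minute st d,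
      aBurn_shift m n x y minute (st.1, [], 0) d]
    simp [Prod.ext_iff, List.append_assoc]
    push_cast
    ring

theorem bBurn_shift (m n : Int) (st : List (List Int) × List (Int × Int)) (p : Int × Int) :
    bBurn m n st p = ((bBurn m n (st.1, []) p).1, st.2 ++ (bBurn m n (st.1, []) p).2) := by
  unfold bBurn
  split_ifs <;> simp

theorem bBurn_acc (m n : Int) (ps : List (Int × Int)) :
    ∀ (st : List (List Int) × List (Int × Int)),
    ps.foldl (bBurn m n) st =
      ((ps.foldl (bBurn m n) (st.1, [])).1, st.2 ++ (ps.foldl (bBurn m n) (st.1, [])).2) := by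
  induction ps with
  | nil => intro st; simp
  | cons p t ih =>
    intro st
    rw [List.foldl_cons, List.foldl_cons, ih (bBurn m n st p), ih (bBurn m n (st.1, []) p),
      bBurn_shift m n st p, bBurn_shift m n (st.1, []) p]
    simp [Prod.ext_iff, List.append_assoc]

theorem bRound_acc (m n : Int) (F : List (Int × Int)) :
    ∀ (st : List (List Int) × List (Int × Int)),
    F.foldl (fun st p => (bNbrs p.1 p.2).foldl (bBurn m n) st) st =
      ((bRound m n st.1 F).1, st.2 ++ (bRound m n st.1 F).2) := by
  induction F with
  | nil => intro st; simp [bRound]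
  | cons p t ih =>
    intro st
    have hR : bRound m n st.1 (p :: t) =
        ((bRound m n ((bNbrs p.1 p.2).foldl (bBurn m n) (st.1, [])).1 t).1,
         ((bNbrs p.1 p.2).foldl (bBurn m n) (st.1, [])).2 ++
           (bRound m n ((bNbrs p.1 p.2).foldl (bBurn m n) (st.1, [])).1 t).2) := by
      show List.foldl _ (st.1, []) (p :: t) = _
      rw [List.foldl_cons, bBurn_acc m n (bNbrs p.1 p.2) (st.1, []), ih]
    rw [List.foldl_cons, bBurn_acc m n (bNbrs p.1 p.2) st, ih, hR]
    simp [List.append_assoc]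

theorem pv_bNbrs_eq (x y : Int) : aDirs.map (fun d => (x + d.1, y + d.2)) = bNbrs x y := by
  simp [aDirs, bNbrs, Prod.ext_iff]
  omega

theorem step_bridge (m n x y mi : Int) (g : List (List Int)) (acc : List (Int × Int))
    (d : Int × Int) :
    aBurn m n x y mi (g, pvStamp (mi + 1) acc, (acc.length : Int)) d =
      ((bBurn m n (g, acc) (x + d.1, y + d.2)).1,
       pvStamp (mi + 1) (bBurn m n (g, acc) (x + d.1, y + d.2)).2,
       ((bBurn m n (g, acc) (x + d.1, y + d.2)).2.length : Int)) := by
  unfold aBurn bBurn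
  split_ifs with h
  · simp [pvStamp]
  · rfl

theorem dirs_bridge (m n x y mi : Int) (ds : List (Int × Int)) :
    ∀ (g : List (List Int)) (acc : List (Int × Int)),
    ds.foldl (aBurn m n x y mi) (g, pvStamp (mi + 1) acc, (acc.length : Int)) =
      (((ds.map (fun d => (x + d.1, y + d.2))).foldl (bBurn m n) (g, acc)).1,
       pvStamp (mi + 1) ((ds.map (fun d => (x + d.1, y + d.2))).foldl (bBurn m n) (g, acc)).2,
       (((ds.map (fun d => (x + d.1, y + d.2))).foldl (bBurn m n) (g, acc)).2.length : Int)) := by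
  induction ds with
  | nil => intro g acc; rfl
  | cons d t ih =>
    intro g acc
    rw [List.foldl_cons, step_bridge, List.map_cons, List.foldl_cons]
    exact ih (bBurn m n (g, acc) (x + d.1, y + d.2)).1 (bBurn m n (g, acc) (x + d.1, y + d.2)).2

theorem node_bridge (m n x y minute : Int) (g : List (List Int)) :
    aDirs.foldl (aBurn m n x y minute) (g, [], 0) =
      (((bNbrs x y).foldl (bBurn m n) (g, [])).1,
       pvStamp (minute + 1) ((bNbrs x y).foldl (bBurn m n) (g, [])).2,
       (((bNbrs x y).foldl (bBurn m n) (g, [])).2.length : Int)) := by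
  have h := dirs_bridge m n x y minute aDirs g []
  rw [pv_bNbrs_eq] at h
  simpa [pvStamp] using h

theorem level_bridge (m n d : Int) (F : List (Int × Int)) :
    ∀ (g : List (List Int)) (N : List (Int × Int)) (minutes burned : Int),
    aLoop m n g (pvStamp d F ++ pvStamp (d + 1) N) minutes burned =
      aLoop m n (bRound m n g F).1 (pvStamp (d + 1) (N ++ (bRound m n g F).2))
        (if F = [] then minutes else max minutes d)
        (burned + ((bRound m n g F).2.length : Int)) := by
  induction F with
  | nil => intro g N minutes burned; simp [pvStamp, bRound]
  | cons p t ih =>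
    intro g N minutes burned
    rcases p with ⟨x, y⟩
    rw [show pvStamp d ((x, y) :: t) = (x, y, d) :: pvStamp d t from rfl, List.cons_append, aLoop]
    rw [aBurn_acc m n x y d aDirs (g, [], burned)]
    simp only [node_bridge]
    have hq : (pvStamp d t ++ pvStamp (d + 1) N) ++
        ([] ++ pvStamp (d + 1) ((bNbrs x y).foldl (bBurn m n) (g, [])).2) =
        pvStamp d t ++ pvStamp (d + 1) (N ++ ((bNbrs x y).foldl (bBurn m n) (g, [])).2) := by
      simp [pvStamp, List.append_assoc]
    rw [hq, ih]
    have hr : bRound m n g ((x, y) :: t) =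
        ((bRound m n ((bNbrs x y).foldl (bBurn m n) (g, [])).1 t).1,
         ((bNbrs x y).foldl (bBurn m n) (g, [])).2 ++
           (bRound m n ((bNbrs x y).foldl (bBurn m n) (g, [])).1 t).2) := by
      show ((x, y) :: t).foldl (fun st p => (bNbrs p.1 p.2).foldl (bBurn m n) st) (g, []) = _
      rw [List.foldl_cons, bRound_acc m n t ((bNbrs x y).foldl (bBurn m n) (g, []))]
    rw [hr]
    have hmin2 : (if ((x, y) :: t : List (Int × Int)) = [] then minutes else max minutes d) =
        max minutes d := by simp
    rw [hmin2]
    have hmin3 : (if t = [] then max minutes d else max (max minutes d) d) = max minutes d := by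
      split_ifs with h
      · rfl
      · rw [max_assoc, max_self]
    rw [hmin3]
    simp [pvStamp, List.append_assoc, add_assoc]

theorem bRound_ones' (m n : Int) (F : List (Int × Int)) (g : List (List Int)) :
    pvOnes m n (bRound m n g F).1 + (bRound m n g F).2.length = pvOnes m n g := by
  have h := bRound_ones m n F g []
  simpa using h

theorem outer_bridge (m n : Int) :
    ∀ (k : Nat) (g : List (List Int)) (F : List (Int × Int)) (d mcur burned : Int),
    pvOnes m n g = k → F ≠ [] → mcur ≤ d →
    aLoop m n g (pvStamp d F) mcur burned =
      ((bLoop m n g F d).1,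
       burned + ((pvOnes m n g : Int) - (pvOnes m n (bLoop m n g F d).2 : Int))) := by
  intro k
  induction k using Nat.strong_induction_on with
  | _ k ih =>
    intro g F d mcur burned hk hF hmd
    have hlev := level_bridge m n d F g [] mcur burned
    rw [show pvStamp (d + 1) ([] : List (Int × Int)) = [] from rfl, List.append_nil,
      List.nil_append, if_neg hF, max_eq_right hmd] at hlev
    rw [hlev]
    have hones := bRound_ones' m n F g
    by_cases hnx : (bRound m n g F).2 = []
    · rw [hnx, show pvStamp (d + 1) ([] : List (Int × Int)) = [] from rfl, aLoop]
      rw [show bLoop m n g F d = (d, (bRound m n g F).1) by rw [bLoop, if_neg hF, if_pos hnx]]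
      have h0 : pvOnes m n (bRound m n g F).1 = pvOnes m n g := by
        rw [hnx] at hones; simpa using hones
      simp [h0]
    · have hlt : pvOnes m n (bRound m n g F).1 < k := by
        have : (bRound m n g F).2.length ≠ 0 := by
          simpa [List.length_eq_zero_iff] using hnx
        omega
      rw [ih _ hlt (bRound m n g F).1 (bRound m n g F).2 (d + 1) d
        (burned + ((bRound m n g F).2.length : Int)) rfl hnx (by omega)]
      rw [show bLoop m n g F d = bLoop m n (bRound m n g F).1 (bRound m n g F).2 (d + 1) by
        rw [bLoop, if_neg hF, if_neg hnx]]
      congr 1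
      omega

theorem scan_inner (m n : Int) (g : List (List Int)) (i : Int) (js : List Int) :
    ∀ (q : List (Int × Int × Int)) (t : Int),
    js.foldl (fun st j =>
      let st := if pvCell g i j = 2 then (st.1 ++ [(i, j, (0 : Int))], st.2) else st
      if pvCell g i j = 1 then (st.1, st.2 + 1) else st) (q, t) =
    (q ++ pvStamp 0 ((js.filter (fun j => pvCell g i j == 2)).map (fun j => (i, j))),
     t + ((js.filter (fun j => pvCell g i j == 1)).length : Int)) := by
  induction js with
  | nil => intro q t; simp [pvStamp]
  | cons j t ih =>
    intro q tt
    simp only [List.foldl_cons]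
    by_cases h2 : pvCell g i j = 2 <;> by_cases h1 : pvCell g i j = 1
    · rw [h2] at h1; exact absurd h1 (by norm_num)
    · simp only [if_pos h2, if_neg h1, List.filter_cons, h2, h1]
      rw [ih]
      simp [pvStamp, h2, h1, List.append_assoc]
    · simp only [if_neg h2, if_pos h1, List.filter_cons]
      rw [ih]
      simp [pvStamp, h2, h1]
      ring
    · simp only [if_neg h2, if_neg h1, List.filter_cons]
      rw [ih]
      simp [pvStamp, h2, h1]

theorem scan_bridge (m n : Int) (g : List (List Int)) :
    aScan m n g = (pvStamp 0 (bFrontier m n g), (pvOnes m n g : Int)) := by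
  unfold aScan bFrontier pvOnes
  generalize (PySem.List.pyRange 0 m 1) = is
  induction is using List.reverseRecOn with
  | nil => simp [pvStamp]
  | append_singleton is i ih =>
    rw [List.foldl_append, List.foldl_cons, List.foldl_nil, ih]
    rw [scan_inner m n g i _]
    simp [pvStamp, List.flatMap_append]

theorem any_iff_ones (m n : Int) (g : List (List Int)) :
    ((PySem.List.pyRange 0 m 1).any fun i =>
      (PySem.List.pyRange 0 n 1).any fun j => pvCell g i j == 1) = true ↔
    pvOnes m n g ≠ 0 := by
  unfold pvOnes
  rw [List.any_eq_true]
  constructor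
  · rintro ⟨i, hi, h⟩ hz
    rw [List.any_eq_true] at h
    rcases h with ⟨j, hj, hj1⟩
    have hlen : ((PySem.List.pyRange 0 n 1).filter (fun j => pvCell g i j == 1)).length = 0 :=
      List.sum_eq_zero_iff.mp hz _ (List.mem_map_of_mem hi)
    rw [List.length_eq_zero_iff, List.filter_eq_nil_iff] at hlen
    exact hlen j hj hj1
  · intro hz
    by_contra hno
    push_neg at hno
    apply hz
    rw [List.sum_eq_zero_iff]
    intro v hv
    rw [List.mem_map] at hv
    rcases hv with ⟨i, hi, rfl⟩
    rw [List.length_eq_zero_iff, List.filter_eq_nil_iff]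
    intro j hj hc
    exact (hno i hi) (List.any_eq_true.mpr ⟨j, hj, hc⟩)

-- ---- bridge level BFS ↔ B's sweep simulation (bLoop ↔ sLoop) ----

-- the burn guard of a cell
abbrev pvG (m n : Int) (g : List (List Int)) (q : Int × Int) : Prop :=
  0 ≤ q.1 ∧ q.1 < m ∧ 0 ≤ q.2 ∧ q.2 < n ∧ pvCell g q.1 q.2 = 1

theorem cell_set_ne' {g : List (List Int)} {x y i j : Int}
    (h : pvCell g x y = 1) (hx : 0 ≤ x) (hy : 0 ≤ y) (hi : 0 ≤ i) (hj : 0 ≤ j)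
    (hne : (i, j) ≠ (x, y)) : pvCell (pvSet g x y) i j = pvCell g i j := by
  apply pvCell_set_ne h
  by_cases h1 : i = x
  · subst h1
    have h2 : j ≠ y := fun hh => hne (by rw [hh])
    right; omega
  · left; omega

theorem guard_set {m n : Int} {g : List (List Int)} {x y : Int} {q : Int × Int}
    (h : pvCell g x y = 1) (hx : 0 ≤ x) (hy : 0 ≤ y) (hne : q ≠ (x, y)) :
    pvG m n (pvSet g x y) q ↔ pvG m n g q := by
  by_cases hq : 0 ≤ q.1 ∧ 0 ≤ q.2
  · unfold pvG
    rw [cell_set_ne' h hx hy hq.1 hq.2 (by rcases q with ⟨a, b⟩; exact hne)]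
  · constructor <;> (intro hg; exact (hq ⟨hg.1, hg.2.2.1⟩).elim)

theorem nodup_bNbrs (x y : Int) : (bNbrs x y).Nodup := by
  simp [bNbrs, Prod.ext_iff]
  omega

theorem nbr_symm {p q : Int × Int} : q ∈ bNbrs p.1 p.2 ↔ p ∈ bNbrs q.1 q.2 := by
  rcases p with ⟨a, b⟩; rcases q with ⟨c, d⟩
  simp [bNbrs, Prod.ext_iff]
  omega

theorem foldl_bBurn_grid (m n : Int) (qs : List (Int × Int)) (hnd : qs.Nodup) :
    ∀ (g : List (List Int)) (acc : List (Int × Int)) (i j : Int), 0 ≤ i → 0 ≤ j →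
    pvCell ((qs.foldl (bBurn m n) (g, acc)).1) i j =
      if pvG m n g (i, j) ∧ (i, j) ∈ qs then 2 else pvCell g i j := by
  induction qs with
  | nil => intro g acc i j _ _; simp
  | cons q t ih =>
    intro g acc i j hi hj
    rcases List.nodup_cons.mp hnd with ⟨hq, hndt⟩
    rw [List.foldl_cons]
    by_cases hg : pvG m n g q
    · obtain ⟨h1, h2, h3, h4, h5⟩ := hg
      have hstep : bBurn m n (g, acc) q = (pvSet g q.1 q.2, acc ++ [q]) := by
        unfold bBurn; rw [if_pos ⟨h1, h2, h3, h4, h5⟩]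
      rw [hstep, ih hndt (pvSet g q.1 q.2) (acc ++ [q]) i j hi hj]
      by_cases heq : (i, j) = q
      · subst heq
        rw [if_neg (fun hc => hq hc.2),
          if_pos ⟨(⟨h1, h2, h3, h4, h5⟩ : pvG m n g (i, j)), List.mem_cons_self⟩]
        exact pvCell_set_self h5
      · have hGiff : pvG m n (pvSet g q.1 q.2) (i, j) ↔ pvG m n g (i, j) :=
          guard_set h5 h1 h3 heq
        by_cases hG : pvG m n g (i, j)
        · by_cases hmem : (i, j) ∈ t
          · rw [if_pos ⟨hGiff.mpr hG, hmem⟩, if_pos ⟨hG, List.mem_cons_of_mem _ hmem⟩]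
          · rw [if_neg (fun hc => hmem hc.2),
              if_neg (fun hc => (List.mem_cons.mp hc.2).elim (fun h => heq h) hmem)]
            exact cell_set_ne' h5 h1 h3 hi hj heq
        · rw [if_neg (fun hc => hG (hGiff.mp hc.1)), if_neg (fun hc => hG hc.1)]
          exact cell_set_ne' h5 h1 h3 hi hj heq
    · have hstep : bBurn m n (g, acc) q = (g, acc) := by
        unfold bBurn
        rw [if_neg (fun hc => hg ⟨hc.1, hc.2.1, hc.2.2.1, hc.2.2.2.1, hc.2.2.2.2⟩)]
      rw [hstep, ih hndt g acc i j hi hj]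
      by_cases heq : (i, j) = q
      · rw [if_neg (fun hc => hq (heq ▸ hc.2)), if_neg (fun hc => hg (heq ▸ hc.1))]
      · by_cases hG : pvG m n g (i, j)
        · by_cases hmem : (i, j) ∈ t
          · rw [if_pos ⟨hG, hmem⟩, if_pos ⟨hG, List.mem_cons_of_mem _ hmem⟩]
          · rw [if_neg (fun hc => hmem hc.2),
              if_neg (fun hc => (List.mem_cons.mp hc.2).elim (fun h => heq h) hmem)]
        · rw [if_neg (fun hc => hG hc.1), if_neg (fun hc => hG hc.1)]

theorem foldl_bBurn_acc2 (m n : Int) (qs : List (Int × Int)) (hnd : qs.Nodup) :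
    ∀ (g : List (List Int)) (acc : List (Int × Int)),
    (qs.foldl (bBurn m n) (g, acc)).2 = acc ++ qs.filter (fun q => decide (pvG m n g q)) := by
  induction qs with
  | nil => intro g acc; simp
  | cons q t ih =>
    intro g acc
    rcases List.nodup_cons.mp hnd with ⟨hq, hndt⟩
    rw [List.foldl_cons, List.filter_cons]
    by_cases hg : pvG m n g q
    · have hstep : bBurn m n (g, acc) q = (pvSet g q.1 q.2, acc ++ [q]) := by
        unfold bBurn; rw [if_pos ⟨hg.1, hg.2.1, hg.2.2.1, hg.2.2.2.1, hg.2.2.2.2⟩]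
      rw [hstep, ih hndt]
      have hfeq : t.filter (fun r => decide (pvG m n (pvSet g q.1 q.2) r)) =
          t.filter (fun r => decide (pvG m n g r)) := by
        apply List.filter_congr
        intro r hr
        have : r ≠ q := fun h => hq (h ▸ hr)
        simp [guard_set hg.2.2.2.2 hg.1 hg.2.2.1 this]
      rw [hfeq]
      simp [hg]
    · have hstep : bBurn m n (g, acc) q = (g, acc) := by
        unfold bBurn
        rw [if_neg (fun hc => hg ⟨hc.1, hc.2.1, hc.2.2.1, hc.2.2.2.1, hc.2.2.2.2⟩)]
      rw [hstep, ih hndt]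
      simp [hg]

-- which cells ignite in one round from frontier F
abbrev burnsC (m n : Int) (g : List (List Int)) (F : List (Int × Int)) (q : Int × Int) : Prop :=
  pvG m n g q ∧ ∃ p ∈ F, q ∈ bNbrs p.1 p.2

theorem round_grid (m n : Int) (F : List (Int × Int)) :
    ∀ (g : List (List Int)) (i j : Int), 0 ≤ i → 0 ≤ j →
    pvCell (bRound m n g F).1 i j =
      if burnsC m n g F (i, j) then 2 else pvCell g i j := by
  induction F with
  | nil => intro g i j _ _; simp [bRound, burnsC]
  | cons p t ih =>
    intro g i j hi hj
    have hsplit : bRound m n g (p :: t) =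
        ((bRound m n ((bNbrs p.1 p.2).foldl (bBurn m n) (g, [])).1 t).1,
         ((bNbrs p.1 p.2).foldl (bBurn m n) (g, [])).2 ++
           (bRound m n ((bNbrs p.1 p.2).foldl (bBurn m n) (g, [])).1 t).2) := by
      show (p :: t).foldl (fun st r => (bNbrs r.1 r.2).foldl (bBurn m n) st) (g, []) = _
      rw [List.foldl_cons, bRound_acc m n t ((bNbrs p.1 p.2).foldl (bBurn m n) (g, []))]
    set g1 := ((bNbrs p.1 p.2).foldl (bBurn m n) (g, ([] : List (Int × Int)))).1 with hg1
    have hinner : ∀ (a b : Int), 0 ≤ a → 0 ≤ b →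
        pvCell g1 a b = if pvG m n g (a, b) ∧ (a, b) ∈ bNbrs p.1 p.2 then 2 else pvCell g a b :=
      fun a b ha hb => foldl_bBurn_grid m n _ (nodup_bNbrs p.1 p.2) g [] a b ha hb
    rw [hsplit]
    show pvCell (bRound m n g1 t).1 i j = _
    rw [ih g1 i j hi hj]
    have hcell : pvCell g1 i j =
        if pvG m n g (i, j) ∧ (i, j) ∈ bNbrs p.1 p.2 then 2 else pvCell g i j :=
      hinner i j hi hj
    by_cases hX : pvG m n g (i, j) ∧ (i, j) ∈ bNbrs p.1 p.2
    · rw [if_pos hX] at hcell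
      have hG1 : ¬ pvG m n g1 (i, j) := by
        intro hg'
        rw [hg'.2.2.2.2] at hcell
        exact absurd hcell (by norm_num)
      rw [if_neg (fun hc => hG1 hc.1), hcell,
        if_pos ⟨hX.1, ⟨p, List.mem_cons_self, hX.2⟩⟩]
    · rw [if_neg hX] at hcell
      have hG1 : pvG m n g1 (i, j) ↔ pvG m n g (i, j) := by
        unfold pvG; rw [hcell]
      by_cases hG : pvG m n g (i, j)
      · by_cases ht : ∃ p' ∈ t, (i, j) ∈ bNbrs p'.1 p'.2
        · rw [if_pos ⟨hG1.mpr hG, ht⟩,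
            if_pos ⟨hG, ht.elim (fun p' hp' => ⟨p', List.mem_cons_of_mem _ hp'.1, hp'.2⟩)⟩]
        · rw [if_neg (fun hc => ht hc.2), hcell]
          rw [if_neg (fun hc => by
            rcases hc.2 with ⟨p', hp', hmem⟩
            rcases List.mem_cons.mp hp' with rfl | hp't
            · exact hX ⟨hG, hmem⟩
            · exact ht ⟨p', hp't, hmem⟩)]
      · rw [if_neg (fun hc => hG (hG1.mp hc.1)), hcell, if_neg (fun hc => hG hc.1)]

theorem round_mem (m n : Int) (F : List (Int × Int)) :
    ∀ (g : List (List Int)) (q : Int × Int),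
    q ∈ (bRound m n g F).2 ↔ burnsC m n g F q := by
  induction F with
  | nil => intro g q; simp [bRound, burnsC]
  | cons p t ih =>
    intro g q
    have hsplit : (bRound m n g (p :: t)).2 =
        ((bNbrs p.1 p.2).foldl (bBurn m n) (g, [])).2 ++
          (bRound m n ((bNbrs p.1 p.2).foldl (bBurn m n) (g, [])).1 t).2 := by
      show ((p :: t).foldl (fun st r => (bNbrs r.1 r.2).foldl (bBurn m n) st) (g, [])).2 = _
      rw [List.foldl_cons, bRound_acc m n t ((bNbrs p.1 p.2).foldl (bBurn m n) (g, []))]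
    set g1 := ((bNbrs p.1 p.2).foldl (bBurn m n) (g, ([] : List (Int × Int)))).1 with hg1
    have hacc : ((bNbrs p.1 p.2).foldl (bBurn m n) (g, ([] : List (Int × Int)))).2 =
        (bNbrs p.1 p.2).filter (fun r => decide (pvG m n g r)) := by
      have := foldl_bBurn_acc2 m n (bNbrs p.1 p.2) (nodup_bNbrs p.1 p.2) g []
      simpa using this
    have hinner : ∀ (a b : Int), 0 ≤ a → 0 ≤ b →
        pvCell g1 a b = if pvG m n g (a, b) ∧ (a, b) ∈ bNbrs p.1 p.2 then 2 else pvCell g a b :=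
      fun a b ha hb => foldl_bBurn_grid m n _ (nodup_bNbrs p.1 p.2) g [] a b ha hb
    have hGiff : ∀ r : Int × Int, pvG m n g1 r ↔
        (pvG m n g r ∧ ¬ (r ∈ bNbrs p.1 p.2)) ∨ (pvG m n g r ∧ r ∈ bNbrs p.1 p.2 ∧ False) := by
      intro r
      constructor
      · intro hr
        have hcell := hinner r.1 r.2 hr.1 hr.2.2.1
        by_cases hX : pvG m n g r ∧ r ∈ bNbrs p.1 p.2
        · rw [if_pos (by rcases r with ⟨a,b⟩; exact hX)] at hcell
          rw [hr.2.2.2.2] at hcell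
          exact absurd hcell (by norm_num)
        · left
          have hcg : pvCell g r.1 r.2 = 1 := by
            rw [if_neg (by rcases r with ⟨a,b⟩; exact hX)] at hcell
            rw [← hcell]; exact hr.2.2.2.2
          have hG : pvG m n g r := ⟨hr.1, hr.2.1, hr.2.2.1, hr.2.2.2.1, hcg⟩
          exact ⟨hG, fun hm => hX ⟨hG, hm⟩⟩
      · rintro (⟨hG, hnm⟩ | ⟨_, _, hf⟩)
        · have hcell := hinner r.1 r.2 hG.1 hG.2.2.1
          rw [if_neg (by rcases r with ⟨a,b⟩; exact fun hc => hnm hc.2)] at hcell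
          exact ⟨hG.1, hG.2.1, hG.2.2.1, hG.2.2.2.1, by rw [show pvCell g1 r.1 r.2 = pvCell g r.1 r.2 from by rcases r with ⟨a,b⟩; exact hcell]; exact hG.2.2.2.2⟩
        · exact hf.elim
    rw [hsplit, List.mem_append, hacc, List.mem_filter, ih g1 q]
    unfold burnsC
    constructor
    · rintro (⟨hmem, hG⟩ | ⟨hG1, p', hp', hm⟩)
      · exact ⟨of_decide_eq_true hG, ⟨p, List.mem_cons_self, hmem⟩⟩
      · rcases (hGiff q).mp hG1 with ⟨hG, _⟩ | ⟨_, _, hf⟩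
        · exact ⟨hG, ⟨p', List.mem_cons_of_mem _ hp', hm⟩⟩
        · exact hf.elim
    · rintro ⟨hG, p', hp', hm⟩
      rcases List.mem_cons.mp hp' with rfl | hp't
      · exact Or.inl ⟨hm, decide_eq_true hG⟩
      · by_cases hmp : q ∈ bNbrs p.1 p.2
        · exact Or.inl ⟨hmp, decide_eq_true hG⟩
        · exact Or.inr ⟨(hGiff q).mpr (Or.inl ⟨hG, hmp⟩), p', hp't, hm⟩

-- shape preservation ----------------------------------------------------

theorem shape_set_len (g : List (List Int)) (x y : Int) : (pvSet g x y).length = g.length := by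
  simp [pvSet]

theorem shape_set_row (g : List (List Int)) (x y : Int) (k : Nat) :
    ((pvSet g x y).getD k []).length = (g.getD k []).length := by
  unfold pvSet
  by_cases hk : k = x.toNat
  · rw [hk]
    by_cases hx : x.toNat < g.length
    · rw [pv_getD_set_self g x.toNat _ [] hx]
      simp
    · rw [List.set_eq_of_length_le (by omega)]
  · rw [pv_getD_set_ne g _ [] (Ne.symm hk)]

theorem shape_bBurn (m n : Int) (qs : List (Int × Int)) :
    ∀ (st : List (List Int) × List (Int × Int)),
    ((qs.foldl (bBurn m n) st).1.length = st.1.length ∧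
     ∀ k, (((qs.foldl (bBurn m n) st).1.getD k []).length = ((st.1.getD k [])).length)) := by
  induction qs with
  | nil => intro st; exact ⟨rfl, fun _ => rfl⟩
  | cons q t ih =>
    intro st
    rw [List.foldl_cons]
    rcases ih (bBurn m n st q) with ⟨h1, h2⟩
    have hstep : (bBurn m n st q).1.length = st.1.length ∧
        ∀ k, (((bBurn m n st q).1.getD k []).length = ((st.1.getD k [])).length) := by
      unfold bBurn
      split_ifs
      · exact ⟨shape_set_len _ _ _, fun k => shape_set_row _ _ _ k⟩
      · exact ⟨rfl, fun _ => rfl⟩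
    exact ⟨h1.trans hstep.1, fun k => (h2 k).trans (hstep.2 k)⟩

theorem shape_bRound (m n : Int) (F : List (Int × Int)) :
    ∀ (st : List (List Int) × List (Int × Int)),
    ((F.foldl (fun st p => (bNbrs p.1 p.2).foldl (bBurn m n) st) st).1.length = st.1.length ∧
     ∀ k, (((F.foldl (fun st p => (bNbrs p.1 p.2).foldl (bBurn m n) st) st).1.getD k []).length =
       ((st.1.getD k [])).length)) := by
  induction F with
  | nil => intro st; exact ⟨rfl, fun _ => rfl⟩
  | cons p t ih =>
    intro st
    rw [List.foldl_cons]
    rcases ih ((bNbrs p.1 p.2).foldl (bBurn m n) st) with ⟨h1, h2⟩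
    rcases shape_bBurn m n (bNbrs p.1 p.2) st with ⟨h3, h4⟩
    exact ⟨h1.trans h3, fun k => (h2 k).trans (h4 k)⟩

theorem shape_sApply (L : List (Int × Int)) :
    ∀ (g : List (List Int)),
    ((sApply g L).length = g.length ∧
     ∀ k, (((sApply g L).getD k []).length = ((g.getD k [])).length)) := by
  induction L with
  | nil => intro g; exact ⟨rfl, fun _ => rfl⟩
  | cons p t ih =>
    intro g
    rcases ih (pvSet g p.1 p.2) with ⟨h1, h2⟩
    exact ⟨h1.trans (shape_set_len _ _ _), fun k => (h2 k).trans (shape_set_row _ _ _ k)⟩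

theorem shape_bRound1 (m n : Int) (F : List (Int × Int)) (g : List (List Int)) :
    (bRound m n g F).1.length = g.length :=
  (shape_bRound m n F (g, [])).1

theorem shape_bRound2 (m n : Int) (F : List (Int × Int)) (g : List (List Int)) (k : Nat) :
    ((bRound m n g F).1.getD k []).length = (g.getD k []).length :=
  (shape_bRound m n F (g, [])).2 k

theorem grid_ext {g1 g2 : List (List Int)}
    (hlen : g1.length = g2.length)
    (hrow : ∀ k, (g1.getD k []).length = (g2.getD k []).length)
    (hcell : ∀ i j : Int, 0 ≤ i → 0 ≤ j → pvCell g1 i j = pvCell g2 i j) : g1 = g2 := by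
  apply List.ext_getElem hlen
  intro k hk1 hk2
  apply List.ext_getElem
  · have := hrow k
    rwa [List.getD_eq_getElem g1 [] hk1, List.getD_eq_getElem g2 [] hk2] at this
  · intro l hl1 hl2
    have := hcell (k : Int) (l : Int) (by positivity) (by positivity)
    unfold pvCell at this
    simp only [Int.toNat_natCast] at this
    rwa [List.getD_eq_getElem g1 [] hk1, List.getD_eq_getElem g2 [] hk2,
      List.getD_eq_getElem _ 0 hl1, List.getD_eq_getElem _ 0 hl2] at this

-- sIgnited characterisation ---------------------------------------------

theorem mem_sIgnited (m n : Int) (g : List (List Int)) (q : Int × Int) :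
    q ∈ sIgnited m n g ↔
      pvG m n g q ∧ ∃ r ∈ bNbrs q.1 q.2,
        (0 ≤ r.1 ∧ r.1 < m ∧ 0 ≤ r.2 ∧ r.2 < n) ∧ pvCell g r.1 r.2 = 2 := by
  unfold sIgnited
  simp only [List.mem_flatMap, List.mem_map, List.mem_filter, Bool.and_eq_true, beq_iff_eq,
    List.any_eq_true, decide_eq_true_eq]
  constructor
  · rintro ⟨i, hi, j, ⟨hj, h1, r, hr, hrng, h2⟩, rfl⟩
    rcases PySem.List.mem_pyRange_one.mp hi with ⟨hi0, him⟩
    rcases PySem.List.mem_pyRange_one.mp hj with ⟨hj0, hjn⟩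
    exact ⟨⟨hi0, him, hj0, hjn, h1⟩, r, (by simpa [bNbrs] using hr), hrng, h2⟩
  · rintro ⟨⟨hi0, him, hj0, hjn, h1⟩, r, hr, hrng, h2⟩
    exact ⟨q.1, PySem.List.mem_pyRange_one.mpr ⟨hi0, him⟩, q.2,
      ⟨PySem.List.mem_pyRange_one.mpr ⟨hj0, hjn⟩, h1, r, (by simpa [bNbrs] using hr), hrng, h2⟩,
      rfl⟩

theorem nodup_sIgnited (m n : Int) (g : List (List Int)) : (sIgnited m n g).Nodup := by
  unfold sIgnited
  refine List.nodup_flatMap.mpr ⟨?_, ?_⟩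
  · intro i _
    exact List.Nodup.map (fun a b h => by simpa using congrArg Prod.snd h)
      ((PySem.List.nodup_pyRange_one 0 n).filter _)
  · refine (PySem.List.nodup_pyRange_one 0 m).imp ?_
    intro i i' hne
    intro q hq hq'
    simp only [List.mem_map, List.mem_filter] at hq hq'
    rcases hq with ⟨j, _, rfl⟩
    rcases hq' with ⟨j', _, hjj⟩
    exact hne (by simpa using congrArg Prod.fst hjj.symm)

-- the invariant: frontier cells burn (in range, =2), and every cell the sweep would
-- ignite has a frontier neighbour
def pvInv (m n : Int) (g : List (List Int)) (F : List (Int × Int)) : Prop :=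
  (∀ q ∈ F, (0 ≤ q.1 ∧ q.1 < m ∧ 0 ≤ q.2 ∧ q.2 < n) ∧ pvCell g q.1 q.2 = 2) ∧
  (∀ q ∈ sIgnited m n g, ∃ r ∈ bNbrs q.1 q.2, r ∈ F)

theorem sIgnited_iff_burnsC {m n : Int} {g : List (List Int)} {F : List (Int × Int)}
    (hInv : pvInv m n g F) (q : Int × Int) :
    q ∈ sIgnited m n g ↔ burnsC m n g F q := by
  constructor
  · intro hq
    rcases hInv.2 q hq with ⟨r, hr, hrF⟩
    exact ⟨(mem_sIgnited m n g q).mp hq |>.1, r, hrF, nbr_symm.mp hr⟩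
  · rintro ⟨hG, p, hpF, hm⟩
    rcases hInv.1 p hpF with ⟨hrng, h2⟩
    exact (mem_sIgnited m n g q).mpr ⟨hG, p, nbr_symm.mp hm, hrng, h2⟩

theorem apply_cell (m n : Int) (L : List (Int × Int)) (hnd : L.Nodup) :
    ∀ (g : List (List Int)), (∀ p ∈ L, pvG m n g p) →
    ∀ (i j : Int), 0 ≤ i → 0 ≤ j →
    pvCell (sApply g L) i j = if (i, j) ∈ L then 2 else pvCell g i j := by
  induction L with
  | nil => intro g _ i j _ _; simp [sApply]
  | cons q t ih =>
    obtain ⟨qa, qb⟩ := q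
    intro g hall i j hi hj
    rcases List.nodup_cons.mp hnd with ⟨hq, hndt⟩
    have hGq := hall (qa, qb) List.mem_cons_self
    show pvCell (sApply (pvSet g qa qb) t) i j = _
    have hall' : ∀ p ∈ t, pvG m n (pvSet g qa qb) p := by
      intro p hp
      exact (guard_set hGq.2.2.2.2 hGq.1 hGq.2.2.1 (fun h => hq (h ▸ hp))).mpr
        (hall p (List.mem_cons_of_mem _ hp))
    rw [ih hndt (pvSet g qa qb) hall' i j hi hj]
    by_cases heq : (i, j) = (qa, qb)
    · injection heq with e1 e2
      subst e1; subst e2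
      rw [if_neg hq, if_pos List.mem_cons_self]
      exact pvCell_set_self hGq.2.2.2.2
    · by_cases hmem : (i, j) ∈ t
      · rw [if_pos hmem, if_pos (List.mem_cons_of_mem _ hmem)]
      · rw [if_neg hmem,
          if_neg (fun hc => (List.mem_cons.mp hc).elim (fun h => heq h) hmem)]
        exact cell_set_ne' hGq.2.2.2.2 hGq.1 hGq.2.2.1 hi hj heq

theorem round_eq_sweep {m n : Int} {g : List (List Int)} {F : List (Int × Int)}
    (hInv : pvInv m n g F) :
    (bRound m n g F).1 = sApply g (sIgnited m n g) := by
  apply grid_ext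
  · rw [shape_bRound1 m n F g, (shape_sApply (sIgnited m n g) g).1]
  · intro k
    rw [shape_bRound2 m n F g k, (shape_sApply (sIgnited m n g) g).2 k]
  · intro i j hi hj
    rw [round_grid m n F g i j hi hj,
      apply_cell m n (sIgnited m n g) (nodup_sIgnited m n g) g
        (fun p hp => ((mem_sIgnited m n g p).mp hp).1) i j hi hj]
    by_cases hmem : (i, j) ∈ sIgnited m n g
    · rw [if_pos ((sIgnited_iff_burnsC hInv (i, j)).mp hmem), if_pos hmem]
    · rw [if_neg (fun hb => hmem ((sIgnited_iff_burnsC hInv (i, j)).mpr hb)), if_neg hmem]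

theorem round_nil_iff {m n : Int} {g : List (List Int)} {F : List (Int × Int)}
    (hInv : pvInv m n g F) :
    ((bRound m n g F).2 = [] ↔ sIgnited m n g = []) := by
  rw [List.eq_nil_iff_forall_not_mem, List.eq_nil_iff_forall_not_mem]
  constructor
  · intro h q hq
    exact h q ((round_mem m n F g q).mpr ((sIgnited_iff_burnsC hInv q).mp hq))
  · intro h q hq
    exact h q ((sIgnited_iff_burnsC hInv q).mpr ((round_mem m n F g q).mp hq))

theorem Inv_step {m n : Int} {g : List (List Int)} {F : List (Int × Int)}
    (hInv : pvInv m n g F) :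
    pvInv m n (bRound m n g F).1 (bRound m n g F).2 := by
  constructor
  · intro q hq
    have hb : burnsC m n g F q := (round_mem m n F g q).mp hq
    refine ⟨⟨hb.1.1, hb.1.2.1, hb.1.2.2.1, hb.1.2.2.2.1⟩, ?_⟩
    have hgr := round_grid m n F g q.1 q.2 hb.1.1 hb.1.2.2.1
    rw [if_pos (by rcases q with ⟨a, b⟩; exact hb)] at hgr
    exact hgr
  · intro q hq
    rcases (mem_sIgnited m n _ q).mp hq with ⟨hG', r, hr, hrng, h2'⟩
    have hcq := round_grid m n F g q.1 q.2 hG'.1 hG'.2.2.1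
    have hnb : ¬ burnsC m n g F q := by
      intro hb
      rw [if_pos (by rcases q with ⟨a, b⟩; exact hb)] at hcq
      exact absurd (hG'.2.2.2.2.symm.trans hcq) (by norm_num)
    rw [if_neg (by rcases q with ⟨a, b⟩; exact hnb)] at hcq
    have hGq : pvG m n g q :=
      ⟨hG'.1, hG'.2.1, hG'.2.2.1, hG'.2.2.2.1,
        by rw [show pvCell g q.1 q.2 = pvCell (bRound m n g F).1 q.1 q.2 from by rcases q with ⟨a,b⟩; exact hcq.symm]; exact hG'.2.2.2.2⟩
    have hcr := round_grid m n F g r.1 r.2 hrng.1 hrng.2.2.1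
    by_cases hbr : burnsC m n g F r
    · exact ⟨r, hr, (round_mem m n F g r).mpr hbr⟩
    · rw [if_neg (by rcases r with ⟨a, b⟩; exact hbr)] at hcr
      have h2 : pvCell g r.1 r.2 = 2 := by
        rw [show pvCell g r.1 r.2 = pvCell (bRound m n g F).1 r.1 r.2 from by rcases r with ⟨a,b⟩; exact hcr.symm]
        exact h2'
      have hqS : q ∈ sIgnited m n g :=
        (mem_sIgnited m n g q).mpr ⟨hGq, r, hr, hrng, h2⟩
      rcases hInv.2 q hqS with ⟨s, hs, hsF⟩
      exact absurd ⟨hGq, s, hsF, nbr_symm.mp hs⟩ hnb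

theorem Inv_init (m n : Int) (g : List (List Int)) : pvInv m n g (bFrontier m n g) := by
  have hmem : ∀ q : Int × Int, q ∈ bFrontier m n g ↔
      (0 ≤ q.1 ∧ q.1 < m ∧ 0 ≤ q.2 ∧ q.2 < n) ∧ pvCell g q.1 q.2 = 2 := by
    intro q
    unfold bFrontier
    simp only [List.mem_flatMap, List.mem_map, List.mem_filter, beq_iff_eq]
    constructor
    · rintro ⟨i, hi, j, ⟨hj, h2⟩, rfl⟩
      rcases PySem.List.mem_pyRange_one.mp hi with ⟨hi0, him⟩
      rcases PySem.List.mem_pyRange_one.mp hj with ⟨hj0, hjn⟩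
      exact ⟨⟨hi0, him, hj0, hjn⟩, h2⟩
    · rintro ⟨⟨hi0, him, hj0, hjn⟩, h2⟩
      exact ⟨q.1, PySem.List.mem_pyRange_one.mpr ⟨hi0, him⟩, q.2,
        ⟨PySem.List.mem_pyRange_one.mpr ⟨hj0, hjn⟩, h2⟩, rfl⟩
  constructor
  · intro q hq; exact (hmem q).mp hq
  · intro q hq
    rcases (mem_sIgnited m n g q).mp hq with ⟨_, r, hr, hrng, h2⟩
    exact ⟨r, hr, (hmem r).mpr ⟨hrng, h2⟩⟩

theorem loop_bridge (m n : Int) :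
    ∀ (k : Nat) (g : List (List Int)) (F : List (Int × Int)) (minutes : Int),
    pvOnes m n g = k → pvInv m n g F →
    bLoop m n g F minutes = sLoop m n g minutes := by
  intro k
  induction k using Nat.strong_induction_on with
  | _ k ih =>
    intro g F minutes hk hInv
    by_cases hF : F = []
    · subst hF
      have hS : sIgnited m n g = [] := by
        rw [List.eq_nil_iff_forall_not_mem]
        intro q hq
        rcases hInv.2 q hq with ⟨r, _, hrF⟩
        cases hrF
      rw [bLoop, if_pos rfl, sLoop, dif_pos hS]
    · by_cases hnx : (bRound m n g F).2 = []
      · have hS : sIgnited m n g = [] := (round_nil_iff hInv).mp hnx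
        rw [bLoop, if_neg hF, if_pos hnx, sLoop, dif_pos hS]
        rw [round_eq_sweep hInv, hS]
        rfl
      · have hS : sIgnited m n g ≠ [] := fun h => hnx ((round_nil_iff hInv).mpr h)
        rw [bLoop, if_neg hF, if_neg hnx, sLoop, dif_neg hS]
        have hlt : pvOnes m n (bRound m n g F).1 < k := by
          have hones := bRound_ones' m n F g
          have : (bRound m n g F).2.length ≠ 0 := by
            simpa [List.length_eq_zero_iff] using hnx
          omega
        rw [ih _ hlt (bRound m n g F).1 (bRound m n g F).2 (minutes + 1) rfl (Inv_step hInv)]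
        rw [round_eq_sweep hInv]

theorem main_equiv (m n : Int) (grid : List (List Int)) :
    min_minutes_to_burn_forest m n grid = min_minutes_to_burn_forest_alt m n grid := by
  have hBS : bLoop m n grid (bFrontier m n grid) 0 = sLoop m n grid 0 :=
    loop_bridge m n (pvOnes m n grid) grid (bFrontier m n grid) 0 rfl (Inv_init m n grid)
  unfold min_minutes_to_burn_forest min_minutes_to_burn_forest_alt
  rw [← hBS, scan_bridge]
  by_cases hF : bFrontier m n grid = []
  · rw [hF, show pvStamp 0 ([] : List (Int × Int)) = [] from rfl, aLoop]
    rw [show bLoop m n grid [] 0 = (0, grid) by rw [bLoop]; simp]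
    by_cases hz : pvOnes m n grid = 0
    · rw [if_pos (by simp [hz]),
        if_neg (fun hA => ((any_iff_ones m n grid).mp hA) hz)]
    · rw [if_neg (by simpa using fun h => hz (by exact_mod_cast h.symm)),
        if_pos ((any_iff_ones m n grid).mpr hz)]
  · rw [outer_bridge m n (pvOnes m n grid) grid (bFrontier m n grid) 0 0 0 rfl hF le_rfl]
    by_cases hz : pvOnes m n (bLoop m n grid (bFrontier m n grid) 0).2 = 0
    · rw [if_pos (by simp [hz]),
        if_neg (fun hA => ((any_iff_ones m n _).mp hA) hz)]
    · rw [if_neg (by intro h; apply hz; omega),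
        if_pos ((any_iff_ones m n _).mpr hz)]
-- ===== VERDICT (by name: the statement is the Claim_ definition above) =====
theorem min_minutes_to_burn_forest_spec : Claim_equal_min_minutes_to_burn_forest := by
  intro m n grid _ _
  unfold Spec_min_minutes_to_burn_forest
  exact main_equiv m n grid
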